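-- pv_equiv track=rewrite | github.com/dancergraham/advent_of_code_2024 | advent_of_code_2024/day05/main.py | fix_order
-- ===== SOURCE A (Python) =====
-- def fix_order(rules, update):
--     for i, page in enumerate(update):
--         for a, b in rules:
--             if a == page:
--                 if b in update[:i]:
--                     i_b = update.index(b)
--                     update[i] = b
--                     update[i_b] = a
--                     return update
-- ===== SOURCE B (Python) =====
-- def fix_order(rules, update):
--     # Rule-centric algorithm: build occurrence lists of every page once, then
--     # compute for each rule its earliest violation position directly and keep
--     # the overall minimum (earliest rule wins ties), instead of scanning every
--     # position of update against every rule.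
--     occ = {}
--     for i, p in enumerate(update):
--         occ.setdefault(p, []).append(i)
--     best_i = None
--     best_b = None
--     for a, b in rules:
--         if a in occ and b in occ:
--             fb = occ[b][0]
--             for i in occ[a]:
--                 if i > fb:
--                     if best_i is None or i < best_i:
--                         best_i, best_b = i, b
--                     break
--     if best_i is None:
--         return None
--     j = occ[best_b][0]
--     page = update[best_i]
--     update[best_i] = best_b
--     update[j] = page
--     return update
-- ===== Notes on version B (the rewrite author's own statement) =====
-- stated objective: faster
-- what changed: B is rule-centric instead of position-centric: it builds occurrence lists of every page once, computes each rule's earliest violation position directly (first occurrence of a after the first occurrence of b) and keeps the minimum over rules, instead of A's scan of every position against the whole rule list with slice membership and list.index.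
import Mathlib
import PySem

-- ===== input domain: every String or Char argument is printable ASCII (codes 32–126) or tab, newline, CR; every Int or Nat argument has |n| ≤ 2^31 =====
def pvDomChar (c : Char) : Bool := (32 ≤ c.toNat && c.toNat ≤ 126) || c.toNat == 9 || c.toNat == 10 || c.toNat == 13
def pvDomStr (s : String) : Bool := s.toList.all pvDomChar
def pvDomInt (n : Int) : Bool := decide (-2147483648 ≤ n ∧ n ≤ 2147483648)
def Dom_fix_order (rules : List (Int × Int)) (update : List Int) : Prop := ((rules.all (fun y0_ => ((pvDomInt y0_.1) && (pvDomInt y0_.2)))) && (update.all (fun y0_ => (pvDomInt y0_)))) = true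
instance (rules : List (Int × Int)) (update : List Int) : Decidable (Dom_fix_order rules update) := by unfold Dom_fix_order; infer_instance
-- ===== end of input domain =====

-- B is rule-centric instead of position-centric: it builds occurrence lists of
-- every page once, computes each rule's earliest violation position directly
-- and keeps the minimum over rules, instead of A's scan of every position
-- against the whole rule list. Both A and B mutate `update` in place on the
-- swap path; the equivalence proved here is about the RETURN value (the
-- mutations coincide anyway).

-- ===== PORT A =====
-- inner loop: for a, b in rules: …
def fixA_inner (update : List Int) (i page : Int) : List (Int × Int) → Option (List Int)
  | [] => none
  | (a, b) :: rs =>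
    if a = page then
      if b ∈ PySem.List.slice update none (some i) then
        match PySem.List.index? update b with
        | some i_b => some (PySem.List.pySetD (PySem.List.pySetD update i b) (i_b : Int) a)
        | none => none  -- unreachable: b ∈ update[:i] ⊆ update, so index? succeeds
      else fixA_inner update i page rs
    else fixA_inner update i page rs

-- outer loop: for i, page in enumerate(update): …
def fixA_outer (rules : List (Int × Int)) (update : List Int) : List (Int × Int) → Option (List Int)
  | [] => none
  | (i, page) :: rest =>
    match fixA_inner update i page rules with
    | some r => some r
    | none => fixA_outer rules update rest

def fix_order (rules : List (Int × Int)) (update : List Int) : Option (List Int) :=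
  fixA_outer rules update (PySem.List.enumerate update 0)

-- ===== PORT B =====
-- occ = {}; for i, p in enumerate(update): occ.setdefault(p, []).append(i)
def fixB_occ (update : List Int) : PySem.Dict Int (List Int) :=
  (PySem.List.enumerate update 0).foldl (fun d p => d.modify p.2 [] (· ++ [p.1])) PySem.Dict.empty

-- inner loop: for i in occ[a]: if i > fb: (keep the smaller best); break
def fixB_scan (fb b : Int) (best : Option (Int × Int)) : List Int → Option (Int × Int)
  | [] => best
  | i :: is =>
    if fb < i then
      match best with
      | none => some (i, b)
      | some (bi, bb) => if i < bi then some (i, b) else some (bi, bb)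
    else fixB_scan fb b best is

-- outer loop: for a, b in rules: if a in occ and b in occ: fb = occ[b][0]; …
def fixB_best (occ : PySem.Dict Int (List Int)) : List (Int × Int) → Option (Int × Int) → Option (Int × Int)
  | [], best => best
  | (a, b) :: rs, best =>
    fixB_best occ rs
      (match occ.get? a, occ.get? b with
       | some la, some (fb :: _) => fixB_scan fb b best la
       | _, _ => best)  -- 'a in occ and b in occ' fails ('some la, some []' is unreachable: occ values are nonempty)

def fix_order_alt (rules : List (Int × Int)) (update : List Int) : Option (List Int) :=
  let occ := fixB_occ update
  match fixB_best occ rules none with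
  | none => none
  | some (i, b) =>
    match PySem.List.pyGet? update i, occ.get? b with
    | some page, some (j :: _) =>
        some (PySem.List.pySetD (PySem.List.pySetD update i b) j page)
    | _, _ => none  -- unreachable: i is a valid index of update and b occurs in update

-- ===== PRECONDITION & SPEC =====
def Spec_fix_order (rules : List (Int × Int)) (update : List Int) (out : Option (List Int)) : Prop := out = fix_order_alt rules update
instance (rules : List (Int × Int)) (update : List Int) (out : Option (List Int)) : Decidable (Spec_fix_order rules update out) := by unfold Spec_fix_order; infer_instance

-- ===== CLAIM (what is proved, stated in full; the proofs are below) =====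
def Claim_equal_fix_order : Prop := ∀ (rules : List (Int × Int)) (update : List Int), Dom_fix_order rules update → Spec_fix_order rules update (fix_order rules update)

-- ===== LEMMAS AND PROOFS =====

-- 'keep the pair with the strictly smaller first component, earlier one on ties'
def keepMin (best : Option (Int × Int)) (q : Int × Int) : Option (Int × Int) :=
  match best with
  | none => some q
  | some r => if q.1 < r.1 then some q else some r

-- occurrence indices of x in l, counted from offset s
def occF (s : Int) (l : List Int) (x : Int) : List Int :=
  match l with
  | [] => []
  | y :: t => if y = x then s :: occF (s + 1) t x else occF (s + 1) t x

-- the per-rule candidate computed by B's loop body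
def candO (occ : PySem.Dict Int (List Int)) (a b : Int) : Option Int :=
  match occ.get? a, occ.get? b with
  | some la, some (fb :: _) => la.find? (fun i => decide (fb < i))
  | _, _ => none

def gC (occ : PySem.Dict Int (List Int)) (q : Int × Int) : Option (Int × Int) :=
  (candO occ q.1 q.2).map (fun i => (i, q.2))

-- rule q is violated at position k of u
def FireAt (u : List Int) (k : Nat) (q : Int × Int) : Prop :=
  u[k]? = some q.1 ∧ q.2 ∈ u.take k

-- r is the leftmost minimum (by first component) of s
def LM (s : List (Int × Int)) (r : Int × Int) : Prop :=
  ∃ pre post, s = pre ++ r :: post ∧ (∀ q ∈ pre, r.1 < q.1) ∧ (∀ q ∈ s, r.1 ≤ q.1)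

lemma scan_eq (fb b : Int) (la : List Int) (best : Option (Int × Int)) :
    fixB_scan fb b best la =
      match la.find? (fun i => decide (fb < i)) with
      | some i => keepMin best (i, b)
      | none => best := by
  induction la with
  | nil => simp [fixB_scan]
  | cons i is ih =>
    by_cases h : fb < i
    · rw [List.find?_cons_of_pos (by simpa using h)]
      cases best with
      | none => simp [fixB_scan, h, keepMin]
      | some r => obtain ⟨bi, bb⟩ := r; simp [fixB_scan, h, keepMin]
    · rw [List.find?_cons_of_neg (by simpa using h)]
      simpa [fixB_scan, h] using ih

lemma best_eq (occ : PySem.Dict Int (List Int)) (rs : List (Int × Int)) :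
    ∀ best : Option (Int × Int),
      fixB_best occ rs best = (rs.filterMap (gC occ)).foldl keepMin best := by
  induction rs with
  | nil => intro best; simp [fixB_best]
  | cons p rs ih =>
    intro best
    obtain ⟨a, b⟩ := p
    simp only [fixB_best]
    rcases h1 : occ.get? a with _ | la <;> rcases h2 : occ.get? b with _ | lb
    · rw [List.filterMap_cons_none (by simp [gC, candO, h1, h2])]
      exact ih best
    · cases lb with
      | nil => rw [List.filterMap_cons_none (by simp [gC, candO, h1, h2])]; exact ih best
      | cons fb lb' => rw [List.filterMap_cons_none (by simp [gC, candO, h1, h2])]; exact ih best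
    · rw [List.filterMap_cons_none (by simp [gC, candO, h1, h2])]
      exact ih best
    · cases lb with
      | nil =>
        rw [List.filterMap_cons_none (by simp [gC, candO, h1, h2])]
        exact ih best
      | cons fb lb' =>
        cases hf : la.find? (fun i => decide (fb < i)) with
        | none =>
          rw [List.filterMap_cons_none (by simp [gC, candO, h1, h2, hf])]
          rw [show (match some la, some (fb :: lb') with
               | some la, some (fb :: _) => fixB_scan fb b best la
               | _, _ => best) = fixB_scan fb b best la from rfl]
          rw [scan_eq, hf]
          exact ih best
        | some i =>
          rw [List.filterMap_cons_some (by simp [gC, candO, h1, h2, hf] : gC occ (a, b) = some (i, b))]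
          rw [show (match some la, some (fb :: lb') with
               | some la, some (fb :: _) => fixB_scan fb b best la
               | _, _ => best) = fixB_scan fb b best la from rfl]
          rw [scan_eq, hf]
          simp only [List.foldl_cons]
          exact ih (keepMin best (i, b))

lemma occF_eq_filter (x : Int) (u : List Int) : ∀ s : Int,
    ((PySem.List.enumerate u s).filter (fun p => p.2 == x)).map (·.1) = occF s u x := by
  induction u with
  | nil => intro s; simp [occF, PySem.List.enumerate_nil]
  | cons y t ih =>
    intro s
    rw [PySem.List.enumerate_cons]
    by_cases h : y = x <;> simp [occF, h, ih (s + 1)]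

lemma getD_swap_fold (l : List (Int × Int)) (d : PySem.Dict Int (List Int)) (c : Int) :
    (l.foldl (fun d p => d.modify p.2 [] (· ++ [p.1])) d).getD c [] =
      d.getD c [] ++ (l.filter (fun p => p.2 == c)).map (·.1) := by
  have h := PySem.Dict.getD_foldl_modify_append (l.map Prod.swap) d c
  rw [List.foldl_map] at h
  rw [List.filter_map, List.map_map] at h
  simpa using h

lemma occ_get?_eq (u : List Int) (x : Int) :
    (fixB_occ u).get? x = if x ∈ u then some (occF 0 u x) else none := by
  have hD : (fixB_occ u).getD x [] = occF 0 u x := by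
    unfold fixB_occ
    rw [getD_swap_fold]
    simp [occF_eq_filter]
  have hkeys : (fixB_occ u).keys = PySem.Set.update (PySem.Dict.empty : PySem.Dict Int (List Int)).keys ((PySem.List.enumerate u 0).map (·.2)) := by
    unfold fixB_occ
    exact PySem.Dict.keys_foldl_modify_key (PySem.List.enumerate u 0) (fun p => p.2) [] (fun _ p => (· ++ [p.1])) PySem.Dict.empty
  have hmem : x ∈ (fixB_occ u).keys ↔ x ∈ u := by
    rw [hkeys, PySem.Dict.keys_empty, PySem.Set.mem_update, PySem.List.map_snd_enumerate]
    simp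
  by_cases hx : x ∈ u
  · have hc : (fixB_occ u).contains x = true :=
      (PySem.Dict.contains_iff_mem_keys _ _).mpr (hmem.mpr hx)
    rw [if_pos hx]
    cases hg : (fixB_occ u).get? x with
    | none =>
      rw [PySem.Dict.get?_eq_none_iff_contains] at hg
      rw [hg] at hc; exact absurd hc (by simp)
    | some v =>
      have := PySem.Dict.getD_eq_get?_getD (fixB_occ u) x ([] : List Int)
      rw [hg] at this
      simp at this
      rw [hD] at this
      rw [this]
  · have hc : (fixB_occ u).contains x = false := by
      by_contra h
      have : (fixB_occ u).contains x = true := by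
        cases hcc : (fixB_occ u).contains x
        · exact absurd hcc h
        · rfl
      exact hx (hmem.mp ((PySem.Dict.contains_iff_mem_keys _ _).mp this))
    rw [if_neg hx, PySem.Dict.get?_eq_none_iff_contains, hc]

lemma occF_head (x : Int) (l : List Int) : ∀ s : Int,
    (occF s l x).head? = (PySem.List.index? l x).map (fun k : Nat => s + (k : Int)) := by
  induction l with
  | nil =>
    intro s
    have : PySem.List.index? ([] : List Int) x = none := by
      rw [PySem.List.index?_eq_none_iff]; simp
    rw [this]; simp [occF]
  | cons y t ih =>
    intro s
    by_cases h : y = x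
    · subst h
      rw [PySem.List.index?_cons_self]
      simp [occF]
    · rw [PySem.List.index?_cons_of_ne _ h]
      simp only [occF, if_neg h]
      rw [ih (s + 1)]
      cases hi : PySem.List.index? t x <;> simp [hi] <;> push_cast <;> ring

lemma occF_mem_iff (x : Int) (l : List Int) : ∀ (s i : Int),
    i ∈ occF s l x ↔ ∃ k : Nat, i = s + (k : Int) ∧ l[k]? = some x := by
  induction l with
  | nil => intro s i; simp [occF]
  | cons y t ih =>
    intro s i
    by_cases h : y = x
    · subst h
      have hocc : occF s (y :: t) y = s :: occF (s + 1) t y := by simp [occF]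
      rw [hocc]
      simp only [List.mem_cons, ih (s + 1) i]
      constructor
      · rintro (rfl | ⟨k, rfl, hk⟩)
        · exact ⟨0, by simp, by simp⟩
        · exact ⟨k + 1, by push_cast; ring, by simpa using hk⟩
      · rintro ⟨k, rfl, hk⟩
        cases k with
        | zero => left; simp
        | succ k => right; exact ⟨k, by push_cast; ring, by simpa using hk⟩
    · have hocc : occF s (y :: t) x = occF (s + 1) t x := by simp [occF, h]
      rw [hocc, ih (s + 1) i]
      constructor
      · rintro ⟨k, rfl, hk⟩
        exact ⟨k + 1, by push_cast; ring, by simpa using hk⟩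
      · rintro ⟨k, rfl, hk⟩
        cases k with
        | zero => exfalso; simp at hk; exact h hk
        | succ k => exact ⟨k, by push_cast; ring, by simpa using hk⟩

lemma occF_find_none_iff (x fb : Int) (l : List Int) (s : Int) :
    (occF s l x).find? (fun j => decide (fb < j)) = none ↔
      ∀ k : Nat, l[k]? = some x → s + (k : Int) ≤ fb := by
  rw [List.find?_eq_none]
  constructor
  · intro h k hk
    have := h (s + (k : Int)) ((occF_mem_iff x l s _).mpr ⟨k, rfl, hk⟩)
    simp at this; omega
  · intro h j hj
    obtain ⟨k, rfl, hk⟩ := (occF_mem_iff x l s j).mp hj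
    have := h k hk
    simp; omega

lemma occF_find_some_iff (x fb : Int) (l : List Int) : ∀ (s i : Int),
    (occF s l x).find? (fun j => decide (fb < j)) = some i ↔
      ∃ k : Nat, i = s + (k : Int) ∧ l[k]? = some x ∧ fb < i ∧
        (∀ k' : Nat, k' < k → l[k']? = some x → s + (k' : Int) ≤ fb) := by
  induction l with
  | nil => intro s i; simp [occF]
  | cons y t ih =>
    intro s i
    by_cases hyx : y = x
    · subst hyx
      have hocc : occF s (y :: t) y = s :: occF (s + 1) t y := by simp [occF]
      by_cases hfb : fb < s
      · rw [hocc, List.find?_cons_of_pos (by simpa using hfb)]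
        constructor
        · rintro h
          injection h with h
          subst h
          exact ⟨0, by simp, by simp, hfb, by omega⟩
        · rintro ⟨k, rfl, hk, hlt, hall⟩
          cases k with
          | zero => simp
          | succ k =>
            exfalso
            have := hall 0 (by omega) (by simp)
            omega
      · rw [hocc, List.find?_cons_of_neg (by simpa using hfb)]
        rw [ih (s + 1) i]
        constructor
        · rintro ⟨k, rfl, hk, hlt, hall⟩
          refine ⟨k + 1, by push_cast; ring, by simpa using hk, hlt, ?_⟩
          intro k' hk' hx'
          cases k' with
          | zero => simp; omega
          | succ k' =>
            have := hall k' (by omega) (by simpa using hx')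
            push_cast at this ⊢; omega
        · rintro ⟨k, hi, hk, hlt, hall⟩
          cases k with
          | zero =>
            exfalso
            simp at hi
            omega
          | succ k =>
            refine ⟨k, by push_cast at hi ⊢; omega, by simpa using hk, hlt, ?_⟩
            intro k' hk' hx'
            have := hall (k' + 1) (by omega) (by simpa using hx')
            push_cast at this ⊢; omega
    · have hocc : occF s (y :: t) x = occF (s + 1) t x := by simp [occF, hyx]
      rw [hocc, ih (s + 1) i]
      constructor
      · rintro ⟨k, rfl, hk, hlt, hall⟩
        refine ⟨k + 1, by push_cast; ring, by simpa using hk, hlt, ?_⟩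
        intro k' hk' hx'
        cases k' with
        | zero => exfalso; simp at hx'; exact hyx hx'
        | succ k' =>
          have := hall k' (by omega) (by simpa using hx')
          push_cast at this ⊢; omega
      · rintro ⟨k, hi, hk, hlt, hall⟩
        cases k with
        | zero => exfalso; simp at hk; exact hyx hk
        | succ k =>
          refine ⟨k, by push_cast at hi ⊢; omega, by simpa using hk, hlt, ?_⟩
          intro k' hk' hx'
          have := hall (k' + 1) (by omega) (by simpa using hx')
          push_cast at this ⊢; omega

lemma mem_take_iff : ∀ (u : List Int) (k : Nat) (x : Int),
    x ∈ u.take k ↔ ∃ m : Nat, m < k ∧ u[m]? = some x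
  | _, 0, x => by simp
  | [], _, x => by simp
  | y :: t, k + 1, x => by
    rw [List.take_succ_cons]
    simp only [List.mem_cons, mem_take_iff t k x]
    constructor
    · rintro (rfl | ⟨m, hm, hx⟩)
      · exact ⟨0, by omega, by simp⟩
      · exact ⟨m + 1, by omega, by simpa using hx⟩
    · rintro ⟨m, hm, hx⟩
      cases m with
      | zero => simp at hx; exact Or.inl hx.symm
      | succ m => exact Or.inr ⟨m, by omega, by simpa using hx⟩

lemma mem_take_iff_index (u : List Int) (x : Int) (k : Nat) :
    x ∈ u.take k ↔ ∃ fb : Nat, PySem.List.index? u x = some fb ∧ fb < k := by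
  rw [mem_take_iff]
  constructor
  · rintro ⟨m, hm, hx⟩
    obtain ⟨hml, hmx⟩ := List.getElem?_eq_some_iff.mp hx
    have hxu : x ∈ u := by rw [← hmx]; exact List.getElem_mem _
    obtain ⟨fb, hfb⟩ := Option.isSome_iff_exists.mp ((PySem.List.index?_isSome_iff u x).mpr hxu)
    refine ⟨fb, hfb, ?_⟩
    obtain ⟨hk, hfbv, hmin⟩ := PySem.List.getElem_of_index?_eq_some hfb
    by_contra hge
    push_neg at hge
    exact hmin m (by omega) hmx
  · rintro ⟨fb, hfb, hlt⟩
    obtain ⟨hk, hv, _⟩ := PySem.List.getElem_of_index?_eq_some hfb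
    exact ⟨fb, hlt, List.getElem?_eq_some_iff.mpr ⟨hk, hv⟩⟩

lemma fire_mem1 {u : List Int} {k : Nat} {q : Int × Int} (h : FireAt u k q) : q.1 ∈ u := by
  obtain ⟨h1, _⟩ := h
  obtain ⟨hl, hx⟩ := List.getElem?_eq_some_iff.mp h1
  rw [← hx]; exact List.getElem_mem _

lemma fire_mem2 {u : List Int} {k : Nat} {q : Int × Int} (h : FireAt u k q) : q.2 ∈ u :=
  List.mem_of_mem_take h.2

lemma cand_none_iff (u : List Int) (q : Int × Int) :
    candO (fixB_occ u) q.1 q.2 = none ↔ ∀ k : Nat, ¬ FireAt u k q := by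
  by_cases h1 : q.1 ∈ u
  · by_cases h2 : q.2 ∈ u
    · obtain ⟨fb, hfb⟩ := Option.isSome_iff_exists.mp ((PySem.List.index?_isSome_iff u q.2).mpr h2)
      have hhead := occF_head q.2 u 0
      rw [hfb] at hhead
      cases hsh : occF 0 u q.2 with
      | nil => rw [hsh] at hhead; simp at hhead
      | cons j tl =>
        rw [hsh] at hhead
        simp at hhead
        unfold candO
        rw [occ_get?_eq, occ_get?_eq, if_pos h1, if_pos h2, hsh]
        simp only []
        rw [occF_find_none_iff]
        constructor
        · intro h k hF
          obtain ⟨hk1, hk2⟩ := hF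
          obtain ⟨fb', hfb', hlt⟩ := (mem_take_iff_index u q.2 k).mp hk2
          rw [hfb] at hfb'
          injection hfb' with hfb'
          have := h k hk1
          omega
        · intro h k hk
          by_contra hc
          push_neg at hc
          have hmem : q.2 ∈ u.take k := (mem_take_iff_index u q.2 k).mpr ⟨fb, hfb, by omega⟩
          exact h k ⟨hk, hmem⟩
    · unfold candO
      rw [occ_get?_eq, occ_get?_eq, if_pos h1, if_neg h2]
      constructor
      · intro _ k hF; exact h2 (fire_mem2 hF)
      · intro _; rfl
  · unfold candO
    rw [occ_get?_eq, if_neg h1]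
    constructor
    · intro _ k hF; exact h1 (fire_mem1 hF)
    · intro _; rfl

lemma cand_some_iff (u : List Int) (q : Int × Int) (i : Int) :
    candO (fixB_occ u) q.1 q.2 = some i ↔
      ∃ k : Nat, i = (k : Int) ∧ FireAt u k q ∧ ∀ k' : Nat, k' < k → ¬ FireAt u k' q := by
  by_cases h1 : q.1 ∈ u
  · by_cases h2 : q.2 ∈ u
    · obtain ⟨fb, hfb⟩ := Option.isSome_iff_exists.mp ((PySem.List.index?_isSome_iff u q.2).mpr h2)
      have hhead := occF_head q.2 u 0
      rw [hfb] at hhead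
      cases hsh : occF 0 u q.2 with
      | nil => rw [hsh] at hhead; simp at hhead
      | cons j tl =>
        rw [hsh] at hhead
        simp at hhead
        unfold candO
        rw [occ_get?_eq, occ_get?_eq, if_pos h1, if_pos h2, hsh]
        simp only []
        rw [occF_find_some_iff]
        constructor
        · rintro ⟨k, rfl, hk, hlt, hall⟩
          refine ⟨k, by simp, ⟨hk, ?_⟩, ?_⟩
          · exact (mem_take_iff_index u q.2 k).mpr ⟨fb, hfb, by omega⟩
          · intro k' hk' hF
            obtain ⟨hF1, hF2⟩ := hF
            obtain ⟨fb', hfb', hlt'⟩ := (mem_take_iff_index u q.2 k').mp hF2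
            rw [hfb] at hfb'
            injection hfb' with hfb'
            have := hall k' hk' hF1
            omega
        · rintro ⟨k, rfl, ⟨hFk1, hFk2⟩, hmin⟩
          obtain ⟨fb', hfb', hlt'⟩ := (mem_take_iff_index u q.2 k).mp hFk2
          rw [hfb] at hfb'
          injection hfb' with hfb'
          refine ⟨k, by simp, hFk1, by omega, ?_⟩
          intro k' hk' hx'
          by_contra hc
          push_neg at hc
          have : q.2 ∈ u.take k' := (mem_take_iff_index u q.2 k').mpr ⟨fb, hfb, by omega⟩
          exact hmin k' hk' ⟨hx', this⟩
    · unfold candO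
      rw [occ_get?_eq, occ_get?_eq, if_pos h1, if_neg h2]
      constructor
      · intro h; exact absurd h (by simp)
      · rintro ⟨k, _, hF, _⟩; exact absurd (fire_mem2 hF) h2
  · unfold candO
    rw [occ_get?_eq, if_neg h1]
    constructor
    · intro h; exact absurd h (by simp)
    · rintro ⟨k, _, hF, _⟩; exact absurd (fire_mem1 hF) h1

lemma LM_mem {s : List (Int × Int)} {r : Int × Int} (h : LM s r) : r ∈ s := by
  obtain ⟨pre, post, rfl, -, -⟩ := h
  simp

lemma LM_cons_elim {x : Int × Int} {t : List (Int × Int)} {r : Int × Int}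
    (h : LM (x :: t) r) :
    (r = x ∧ ∀ q ∈ t, x.1 ≤ q.1) ∨ (r.1 < x.1 ∧ LM t r) := by
  obtain ⟨pre, post, heq, hpre, hmin⟩ := h
  cases pre with
  | nil =>
    simp only [List.nil_append] at heq
    injection heq with h1 h2
    subst h1
    subst h2
    left
    exact ⟨rfl, fun q hq => hmin q (by simp [hq])⟩
  | cons c pre' =>
    simp only [List.cons_append] at heq
    injection heq with h1 h2
    subst h1
    right
    refine ⟨hpre x (by simp), pre', post, h2, ?_, ?_⟩
    · intro q hq; exact hpre q (by simp [hq])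
    · intro q hq
      exact hmin q (List.mem_cons_of_mem _ hq)

lemma LM_unique : ∀ (s : List (Int × Int)) (r1 r2 : Int × Int), LM s r1 → LM s r2 → r1 = r2 := by
  intro s
  induction s with
  | nil =>
    intro r1 r2 h1 _
    exact absurd (LM_mem h1) (by simp)
  | cons x t ih =>
    intro r1 r2 h1 h2
    rcases LM_cons_elim h1 with ⟨rfl, hmin1⟩ | ⟨hlt1, hLM1⟩ <;>
      rcases LM_cons_elim h2 with ⟨h2e, hmin2⟩ | ⟨hlt2, hLM2⟩
    · rw [h2e]
    · exact absurd (hmin1 r2 (LM_mem hLM2)) (by omega)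
    · exact absurd (hmin2 r1 (LM_mem hLM1)) (by omega)
    · exact ih r1 r2 hLM1 hLM2

lemma LM_cons_of {l : List (Int × Int)} {r c : Int × Int} (h : LM l r) (hlt : r.1 < c.1) :
    LM (c :: l) r := by
  obtain ⟨pre, post, rfl, hpre, hmin⟩ := h
  refine ⟨c :: pre, post, rfl, ?_, ?_⟩
  · intro q hq
    rcases List.mem_cons.mp hq with rfl | hq
    · exact hlt
    · exact hpre q hq
  · intro q hq
    rcases List.mem_cons.mp hq with rfl | hq
    · omega
    · exact hmin q hq

lemma LM_insert_second {l : List (Int × Int)} {r c q : Int × Int}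
    (h : LM (c :: l) r) (hcq : c.1 ≤ q.1) : LM (c :: q :: l) r := by
  rcases LM_cons_elim h with ⟨rfl, hmin⟩ | ⟨hlt, hLM⟩
  · refine ⟨[], q :: l, rfl, by simp, ?_⟩
    intro p hp
    rcases List.mem_cons.mp hp with rfl | hp
    · omega
    · rcases List.mem_cons.mp hp with rfl | hp
      · omega
      · exact hmin p hp
  · obtain ⟨pre, post, rfl, hpre, hmin⟩ := hLM
    refine ⟨c :: q :: pre, post, rfl, ?_, ?_⟩
    · intro p hp
      rcases List.mem_cons.mp hp with rfl | hp
      · omega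
      · rcases List.mem_cons.mp hp with rfl | hp
        · omega
        · exact hpre p hp
    · intro p hp
      rcases List.mem_cons.mp hp with rfl | hp
      · omega
      · rcases List.mem_cons.mp hp with rfl | hp
        · omega
        · exact hmin p hp

lemma keep_some : ∀ (l : List (Int × Int)) (c : Int × Int),
    ∃ r, l.foldl keepMin (some c) = some r ∧ LM (c :: l) r := by
  intro l
  induction l with
  | nil =>
    intro c
    refine ⟨c, rfl, [], [], rfl, by simp, ?_⟩
    intro q hq
    simp at hq
    rw [hq]
  | cons q l ih =>
    intro c
    by_cases h : q.1 < c.1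
    · obtain ⟨r, hr, hLM⟩ := ih q
      have hrq : r.1 ≤ q.1 := by
        obtain ⟨pre, post, heq, hpre, hmin⟩ := hLM
        exact hmin q (by simp)
      refine ⟨r, ?_, LM_cons_of hLM (by omega)⟩
      simpa [keepMin, h] using hr
    · obtain ⟨r, hr, hLM⟩ := ih c
      refine ⟨r, ?_, LM_insert_second hLM (by omega)⟩
      simpa [keepMin, h] using hr

lemma fold_eq_of_LM {l : List (Int × Int)} {r : Int × Int} (h : LM l r) :
    l.foldl keepMin none = some r := by
  have hmem := LM_mem h
  cases l with
  | nil => simp at hmem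
  | cons c t =>
    have h0 : keepMin none c = some c := rfl
    rw [List.foldl_cons, h0]
    obtain ⟨r', hr', hLM'⟩ := keep_some t c
    rw [hr', LM_unique (c :: t) r' r hLM' h]

lemma inner_eq (u : List Int) (k : Nat) (page : Int) (rs : List (Int × Int)) :
    fixA_inner u (k : Int) page rs =
      (rs.find? (fun q => q.1 == page && decide (q.2 ∈ u.take k))).bind
        (fun q => (PySem.List.index? u q.2).map
          (fun j => PySem.List.pySetD (PySem.List.pySetD u (k : Int) q.2) ((j : Nat) : Int) q.1)) := by
  induction rs with
  | nil => simp [fixA_inner]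
  | cons p rs ih =>
    obtain ⟨a, b⟩ := p
    by_cases ha : a = page
    · by_cases hb : b ∈ u.take k
      · rw [List.find?_cons_of_pos (by simp [ha, hb])]
        show (if a = page then
                if b ∈ PySem.List.slice u none (some (k : Int)) then
                  match PySem.List.index? u b with
                  | some i_b => some (PySem.List.pySetD (PySem.List.pySetD u (k : Int) b) (i_b : Int) a)
                  | none => none
                else fixA_inner u (k : Int) page rs
              else fixA_inner u (k : Int) page rs) =
          (PySem.List.index? u b).map
            (fun j => PySem.List.pySetD (PySem.List.pySetD u (k : Int) b) ((j : Nat) : Int) a)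
        rw [if_pos ha, PySem.List.slice_to_natCast, if_pos hb]
        cases PySem.List.index? u b <;> rfl
      · rw [List.find?_cons_of_neg (by simp [hb])]
        show (if a = page then
                if b ∈ PySem.List.slice u none (some (k : Int)) then
                  match PySem.List.index? u b with
                  | some i_b => some (PySem.List.pySetD (PySem.List.pySetD u (k : Int) b) (i_b : Int) a)
                  | none => none
                else fixA_inner u (k : Int) page rs
              else fixA_inner u (k : Int) page rs) = _
        rw [if_pos ha, PySem.List.slice_to_natCast, if_neg hb]
        exact ih
    · rw [List.find?_cons_of_neg (by simp [ha])]
      show (if a = page then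
              if b ∈ PySem.List.slice u none (some (k : Int)) then
                match PySem.List.index? u b with
                | some i_b => some (PySem.List.pySetD (PySem.List.pySetD u (k : Int) b) (i_b : Int) a)
                | none => none
              else fixA_inner u (k : Int) page rs
            else fixA_inner u (k : Int) page rs) = _
      rw [if_neg ha]
      exact ih

lemma main_loop (rules : List (Int × Int)) (u : List Int) : ∀ (l : List Int) (k : Nat),
    l = u.drop k →
    (∀ k' : Nat, k' < k → ∀ q ∈ rules, ¬ FireAt u k' q) →
    fixA_outer rules u (PySem.List.enumerate l (k : Int)) =
      match (rules.filterMap (gC (fixB_occ u))).foldl keepMin none with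
      | none => none
      | some (i, b) =>
        match PySem.List.pyGet? u i, (fixB_occ u).get? b with
        | some page, some (j :: _) =>
            some (PySem.List.pySetD (PySem.List.pySetD u i b) j page)
        | _, _ => none := by
  intro l
  induction l with
  | nil =>
    intro k hdrop hmin
    have hlen : u.length ≤ k := by
      have := congrArg List.length hdrop
      simp at this
      omega
    have hC : rules.filterMap (gC (fixB_occ u)) = [] := by
      rw [List.filterMap_eq_nil_iff]
      intro q hq
      rw [gC, Option.map_eq_none_iff, cand_none_iff]
      intro k' hF
      rcases Nat.lt_or_ge k' k with h | h
      · exact hmin k' h q hq hF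
      · obtain ⟨h1, -⟩ := hF
        obtain ⟨hlt, -⟩ := List.getElem?_eq_some_iff.mp h1
        omega
    rw [hC]
    simp [fixA_outer, PySem.List.enumerate_nil]
  | cons page rest ih =>
    intro k hdrop hmin
    have hklen : k < u.length := by
      by_contra h
      have : u.drop k = [] := List.drop_eq_nil_of_le (by omega)
      rw [this] at hdrop
      exact absurd hdrop (by simp)
    have hcons : u.drop k = u[k] :: u.drop (k + 1) := List.drop_eq_getElem_cons hklen
    rw [hcons] at hdrop
    injection hdrop with h1 h2
    have hgk : u[k]? = some page := by rw [List.getElem?_eq_getElem hklen, h1]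
    rw [PySem.List.enumerate_cons]
    simp only [fixA_outer]
    rw [inner_eq u k page rules]
    cases hf : rules.find? (fun q => q.1 == page && decide (q.2 ∈ u.take k)) with
    | none =>
      have hmin' : ∀ k' : Nat, k' < k + 1 → ∀ q ∈ rules, ¬ FireAt u k' q := by
        intro k' hk' q hq hF
        rcases Nat.lt_or_ge k' k with h | h
        · exact hmin k' h q hq hF
        · have hk'k : k' = k := by omega
          subst hk'k
          have hnp := List.find?_eq_none.mp hf q hq
          obtain ⟨hF1, hF2⟩ := hF
          rw [hgk] at hF1
          injection hF1 with hq1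
          simp [hq1, hF2] at hnp
      have hrec := ih (k + 1) h2 hmin'
      rw [show (k : Int) + 1 = ((k + 1 : Nat) : Int) by push_cast; ring]
      simpa using hrec
    | some p =>
      obtain ⟨hpred, as_, bs_, hsplit, hpre⟩ := List.find?_eq_some_iff_append.mp hf
      simp at hpred
      obtain ⟨hp1, hp2⟩ := hpred
      have hFk : FireAt u k p := ⟨by rw [hgk, hp1], hp2⟩
      have hpmem : p ∈ rules := by rw [hsplit]; simp
      have hcand : candO (fixB_occ u) p.1 p.2 = some (k : Int) :=
        (cand_some_iff u p (k : Int)).mpr ⟨k, rfl, hFk, fun k' hk' => hmin k' hk' p hpmem⟩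
      have hg : gC (fixB_occ u) p = some ((k : Int), p.2) := by
        rw [gC, hcand]; rfl
      have hmemval : ∀ q' ∈ rules.filterMap (gC (fixB_occ u)),
          ∃ (q : Int × Int) (kq : Nat), q ∈ rules ∧ q' = ((kq : Int), q.2) ∧ FireAt u kq q ∧
            ∀ k' : Nat, k' < kq → ¬ FireAt u k' q := by
        intro q' hq'
        obtain ⟨q, hqmem, hgq⟩ := List.mem_filterMap.mp hq'
        rw [gC] at hgq
        rw [Option.map_eq_some_iff] at hgq
        obtain ⟨i, hi, hq'eq⟩ := hgq
        obtain ⟨kq, rfl, hFq, hminq⟩ := (cand_some_iff u q i).mp hi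
        exact ⟨q, kq, hqmem, hq'eq.symm, hFq, hminq⟩
      have hLM : LM (rules.filterMap (gC (fixB_occ u))) ((k : Int), p.2) := by
        refine ⟨as_.filterMap (gC (fixB_occ u)), bs_.filterMap (gC (fixB_occ u)), ?_, ?_, ?_⟩
        · rw [hsplit, List.filterMap_append, List.filterMap_cons_some hg]
        · intro q' hq'
          obtain ⟨q, hqmem, hgq⟩ := List.mem_filterMap.mp hq'
          rw [gC, Option.map_eq_some_iff] at hgq
          obtain ⟨i, hi, hq'eq⟩ := hgq
          obtain ⟨kq, rfl, hFq, hminq⟩ := (cand_some_iff u q i).mp hi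
          have hkq_ge : k ≤ kq := by
            by_contra hcc
            push_neg at hcc
            exact hmin kq hcc q (by rw [hsplit]; simp [hqmem]) hFq
          have hkq_ne : kq ≠ k := by
            intro he
            subst he
            have hnq := hpre q hqmem
            obtain ⟨hF1, hF2⟩ := hFq
            rw [hgk] at hF1
            injection hF1 with hq1
            simp [hq1, hF2] at hnq
          rw [← hq'eq]
          simp only []
          exact_mod_cast by omega
        · intro q' hq'
          obtain ⟨q, kq, hqmem, rfl, hFq, -⟩ := hmemval q' hq'
          have hkq_ge : k ≤ kq := by
            by_contra hcc
            push_neg at hcc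
            exact hmin kq hcc q hqmem hFq
          simp only []
          exact_mod_cast hkq_ge
      rw [fold_eq_of_LM hLM]
      have hmemb : p.2 ∈ u := List.mem_of_mem_take hp2
      obtain ⟨fb, hfb⟩ := Option.isSome_iff_exists.mp ((PySem.List.index?_isSome_iff u p.2).mpr hmemb)
      have hocc2 := occ_get?_eq u p.2
      rw [if_pos hmemb] at hocc2
      have hhead := occF_head p.2 u 0
      rw [hfb] at hhead
      cases hsh : occF 0 u p.2 with
      | nil => rw [hsh] at hhead; simp at hhead
      | cons j tl =>
        rw [hsh] at hhead hocc2
        simp at hhead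
        show (match (some p).bind
                (fun q => (PySem.List.index? u q.2).map
                  (fun j => PySem.List.pySetD (PySem.List.pySetD u (k : Int) q.2) ((j : Nat) : Int) q.1)) with
              | some r => some r
              | none => fixA_outer rules u (PySem.List.enumerate rest ((k : Int) + 1))) =
             (match PySem.List.pyGet? u (k : Int), (fixB_occ u).get? p.2 with
              | some page, some (j :: _) =>
                  some (PySem.List.pySetD (PySem.List.pySetD u (k : Int) p.2) j page)
              | _, _ => none)
        rw [show ((some p).bind
              (fun q => (PySem.List.index? u q.2).map
                (fun j => PySem.List.pySetD (PySem.List.pySetD u (k : Int) q.2) ((j : Nat) : Int) q.1))) =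
            ((PySem.List.index? u p.2).map
              (fun j => PySem.List.pySetD (PySem.List.pySetD u (k : Int) p.2) ((j : Nat) : Int) p.1)) from rfl]
        rw [hfb, PySem.List.pyGet?_natCast, hgk, hocc2]
        simp [hp1, hhead]

-- ===== VERDICT (by name: the statement is the Claim_ definition above) =====
theorem fix_order_spec : Claim_equal_fix_order := by
  intro rules update _
  have h := main_loop rules update update 0 (by simp) (by omega)
  rw [← best_eq] at h
  simpa [Spec_fix_order, fix_order, fix_order_alt] using h
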